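-- pv_equiv track=rewrite | github.com/shrujansonawane/HackerRank | Sum_vs_XOR.py | sumXor
-- ===== SOURCE A (Python) =====
-- def sumXor(n):
--     result=1
--     while n:
--         b = n&1
--         n >>= 1
--         if b == 0:
--             result*=2
--
--     return result
--
--
--     return count
-- ===== SOURCE B (Python) =====
-- def sumXor(n):
--     # closed form: answer is 2 ** (number of zero bits of n below its top bit)
--     return 2 ** (n.bit_length() - bin(n).count('1'))
-- ===== Notes on version B (the rewrite author's own statement) =====
-- stated objective: simpler
-- what changed: Replaced A's bit-by-bit while loop (doubling result on each zero bit) by the closed form 2 ** (bit_length - popcount).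
-- outside the precondition, e.g. on sumXor(-1): A does not finish within the time limit, B returns 1
import Mathlib
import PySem

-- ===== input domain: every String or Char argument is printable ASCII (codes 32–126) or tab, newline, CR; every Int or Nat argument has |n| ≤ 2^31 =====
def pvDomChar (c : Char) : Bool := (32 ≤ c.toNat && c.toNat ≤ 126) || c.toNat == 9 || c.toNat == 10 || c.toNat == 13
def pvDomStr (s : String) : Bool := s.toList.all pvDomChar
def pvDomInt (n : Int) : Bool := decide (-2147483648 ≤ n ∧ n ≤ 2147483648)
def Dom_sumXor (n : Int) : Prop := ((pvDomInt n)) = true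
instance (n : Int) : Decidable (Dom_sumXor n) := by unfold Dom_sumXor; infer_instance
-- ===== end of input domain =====

-- B replaces A's bit-by-bit loop by the closed form 2^(bit_length - popcount); equal on all n ≥ 0.

-- ===== PORT A =====
-- the while loop of A: state (n, result); for n > 0 it strips one bit per step.
-- (For n < 0 Python's loop never terminates; the 'n ≤ 0' guard only makes the Lean
--  function total there — such inputs are excluded by Pre_sumXor.)
def sumXorLoop (n result : Int) : Int :=
  if h : n ≤ 0 then result
  else
    let b := PySem.Int.mod n 2        -- n & 1
    sumXorLoop (PySem.Int.floordiv n 2)  -- n >>= 1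
      (if b = 0 then result * 2 else result)
termination_by n.toNat
decreasing_by
  have h2 : PySem.Int.floordiv n 2 = n / 2 := PySem.Int.floordiv_eq_ediv_of_pos (by omega)
  rw [h2]; omega

def sumXor (n : Int) : Int := sumXorLoop n 1

-- ===== PORT B =====
-- n.bit_length()  (of |n|, as Python's bit_length ignores the sign)
def pvBitLen (m : Nat) : Nat :=
  if m = 0 then 0 else pvBitLen (m / 2) + 1
decreasing_by exact Nat.div_lt_self (by omega) (by omega)

-- bin(n).count('1')  = popcount of |n|
def pvPopCount (m : Nat) : Nat :=
  if m = 0 then 0 else m % 2 + pvPopCount (m / 2)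
decreasing_by exact Nat.div_lt_self (by omega) (by omega)

def sumXor_alt (n : Int) : Int :=
  (2 : Int) ^ (pvBitLen n.natAbs - pvPopCount n.natAbs)

-- ===== PRECONDITION & SPEC =====
-- Pre_ excludes n < 0: there A's while loop never terminates (arithmetic shift of a
-- negative number never reaches 0), so A returns no value.
def Pre_sumXor (n : Int) : Prop := 0 ≤ n
instance (n : Int) : Decidable (Pre_sumXor n) := by unfold Pre_sumXor; infer_instance
def pvWitness_sumXor : Int := (10)

def Spec_sumXor (n : Int) (out : Int) : Prop := out = sumXor_alt n
instance (n : Int) (out : Int) : Decidable (Spec_sumXor n out) := by unfold Spec_sumXor; infer_instance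

-- ===== CLAIM (what is proved, stated in full; the proofs are below) =====
def Claim_equal_sumXor : Prop := ∀ (n : Int), Dom_sumXor n → Pre_sumXor n → Spec_sumXor n (sumXor n)

-- ===== LEMMAS AND PROOFS =====

theorem pvPopCount_le_bitLen (m : Nat) : pvPopCount m ≤ pvBitLen m := by
  induction m using Nat.strong_induction_on with
  | _ m ih =>
    rw [pvPopCount, pvBitLen]
    split
    · exact Nat.le_refl 0
    · have := ih (m / 2) (Nat.div_lt_self (by omega) (by omega))
      have : m % 2 ≤ 1 := Nat.le_of_lt_succ (Nat.mod_lt m (by omega))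
      omega

-- loop invariant: on a nonnegative n the loop multiplies result by 2^(#zero bits of n)
theorem sumXorLoop_eq (m : Nat) (result : Int) :
    sumXorLoop (m : Int) result = result * (2 : Int) ^ (pvBitLen m - pvPopCount m) := by
  induction m using Nat.strong_induction_on generalizing result with
  | _ m ih =>
    rw [sumXorLoop]
    by_cases hm : m = 0
    · subst hm; simp [pvBitLen, pvPopCount]
    · rw [dif_neg (by simp; omega)]
      have hdiv : PySem.Int.floordiv (m : Int) 2 = ((m / 2 : Nat) : Int) := by
        exact_mod_cast PySem.Int.floordiv_natCast m 2
      have hmod : PySem.Int.mod (m : Int) 2 = ((m % 2 : Nat) : Int) := by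
        exact_mod_cast PySem.Int.mod_natCast m 2
      rw [hdiv, hmod, ih (m / 2) (Nat.div_lt_self (by omega) (by omega))]
      have hle := pvPopCount_le_bitLen (m / 2)
      conv_rhs => rw [pvBitLen, pvPopCount, if_neg hm, if_neg hm]
      rcases Nat.even_or_odd m with he | ho
      · have h2 : m % 2 = 0 := Nat.even_iff.mp he
        rw [h2]
        simp only [Nat.cast_zero]
        have hexp : pvBitLen (m / 2) + 1 - (0 + pvPopCount (m / 2))
            = (pvBitLen (m / 2) - pvPopCount (m / 2)) + 1 := by omega
        rw [hexp, pow_succ]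
        simp; ring
      · have h2 : m % 2 = 1 := Nat.odd_iff.mp ho
        rw [h2]
        have : ((1 : Nat) : Int) ≠ 0 := by decide
        rw [if_neg this]
        have hexp : pvBitLen (m / 2) + 1 - (1 + pvPopCount (m / 2))
            = pvBitLen (m / 2) - pvPopCount (m / 2) := by omega
        rw [hexp]

-- ===== VERDICT (by name: the statement is the Claim_ definition above) =====
theorem sumXor_spec : Claim_equal_sumXor := by
  intro n _ hpre
  unfold Spec_sumXor sumXor sumXor_alt
  obtain ⟨m, rfl⟩ := Int.eq_ofNat_of_zero_le hpre
  rw [sumXorLoop_eq m 1, one_mul]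
  simp
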